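-- pv_equiv track=rewrite | github.com/lee-JunR/Algorithm_BAEKJOON | 프로그래머스/1/160586. 대충 만든 자판/대충 만든 자판.py | get_min_press_dict
-- ===== SOURCE A (Python) =====
-- def get_min_press_dict(keymap_list):
--     keymap_dict = {}
--     for keymap in keymap_list:
--         for press_count, key in enumerate(keymap):
--             if keymap_dict.get(key) is None:
--                 keymap_dict[key] = press_count+1
--             else:
--                 keymap_dict[key] = min(int(keymap_dict.get(key)), press_count+1)
--     return keymap_dict
-- ===== SOURCE B (Python) =====
-- def get_min_press_dict(keymap_list):
--     result = {}
--     for key in "".join(keymap_list):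
--         if key not in result:
--             result[key] = min(km.find(key) for km in keymap_list if key in km) + 1
--     return result
-- ===== Notes on version B (the rewrite author's own statement) =====
-- stated objective: alternative
-- what changed: B iterates over the distinct keys (first-encounter order in the concatenation of all keymaps) and computes each answer directly as min(km.find(key) for keymaps containing key)+1 via string search, instead of A's single streaming pass over (position,char) pairs maintaining a running minimum per key.
import Mathlib
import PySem

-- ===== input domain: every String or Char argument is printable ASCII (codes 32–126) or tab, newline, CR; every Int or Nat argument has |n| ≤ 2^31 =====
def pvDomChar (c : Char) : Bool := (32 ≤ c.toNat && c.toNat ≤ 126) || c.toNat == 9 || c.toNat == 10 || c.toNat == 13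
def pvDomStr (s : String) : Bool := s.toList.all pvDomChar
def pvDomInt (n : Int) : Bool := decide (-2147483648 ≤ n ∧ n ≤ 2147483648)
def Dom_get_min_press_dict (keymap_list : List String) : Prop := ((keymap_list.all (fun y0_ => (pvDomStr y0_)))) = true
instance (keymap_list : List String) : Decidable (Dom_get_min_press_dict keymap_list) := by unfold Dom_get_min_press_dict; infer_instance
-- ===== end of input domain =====

-- B iterates over the distinct keys (first-encounter order in the concatenation of all keymaps)
-- and computes each answer directly as min(km.find(key) for keymaps containing key)+1 by string
-- search, instead of A's streaming pass maintaining a running minimum per key (objective: alternative).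

-- ===== PORT A =====
def get_min_press_dict (keymap_list : List String) : List (String × Int) :=
  (keymap_list.foldl (fun keymap_dict keymap =>
      (PySem.List.enumerate keymap.toList 0).foldl (fun keymap_dict pc =>
        match keymap_dict.get? (String.singleton pc.2) with
        | none => keymap_dict.insert (String.singleton pc.2) (pc.1 + 1)
        | some v => keymap_dict.insert (String.singleton pc.2) (min v (pc.1 + 1)))
        keymap_dict)
    (PySem.Dict.empty : PySem.Dict String Int)).items

-- ===== PORT B =====
-- min(...) over the generator is never taken on an empty generator (key comes from the join),
-- so the .getD 0 default of min? is never used.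
def get_min_press_dict_alt (keymap_list : List String) : List (String × Int) :=
  ((PySem.Str.join "" keymap_list).toList.foldl (fun result key =>
      if (result.get? (String.singleton key)).isSome then result
      else result.insert (String.singleton key)
        ((PySem.List.min? ((keymap_list.filter (fun km => PySem.Str.isIn (String.singleton key) km)).map
            (fun km => PySem.Str.find km (String.singleton key))) (fun x => x)).getD 0 + 1))
    (PySem.Dict.empty : PySem.Dict String Int)).items

-- ===== PRECONDITION & SPEC =====
def Spec_get_min_press_dict (keymap_list : List String) (out : List (String × Int)) : Prop := out = get_min_press_dict_alt keymap_list
instance (keymap_list : List String) (out : List (String × Int)) : Decidable (Spec_get_min_press_dict keymap_list out) := by unfold Spec_get_min_press_dict; infer_instance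

-- ===== CLAIM (what is proved, stated in full; the proofs are below) =====
def Claim_equal_get_min_press_dict : Prop := ∀ (keymap_list : List String), Dom_get_min_press_dict keymap_list → Spec_get_min_press_dict keymap_list (get_min_press_dict keymap_list)

-- ===== LEMMAS AND PROOFS =====

-- the flattened stream of (key, press_count+1) events A processes
def pvEvents (keymap_list : List String) : List (String × Int) :=
  keymap_list.flatMap (fun s =>
    (PySem.List.enumerate s.toList 0).map (fun pc => (String.singleton pc.2, pc.1 + 1)))

def pvStepA (d : PySem.Dict String Int) (p : String × Int) : PySem.Dict String Int :=
  match d.get? p.1 with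
  | none => d.insert p.1 p.2
  | some v => d.insert p.1 (min v p.2)

theorem pvStepA_eq (d : PySem.Dict String Int) (p : String × Int) :
    pvStepA d p = d.insert p.1 (match d.get? p.1 with | none => p.2 | some v => min v p.2) := by
  unfold pvStepA; cases d.get? p.1 <;> rfl

theorem pvStepA_funext :
    pvStepA = fun d p => d.insert p.1 (match d.get? p.1 with | none => p.2 | some v => min v p.2) := by
  funext d p; exact pvStepA_eq d p

-- B's value for a key, exactly the expression the port of B inserts
def pvF (keymap_list : List String) (k : String) : Int :=
  (PySem.List.min? ((keymap_list.filter (fun km => PySem.Str.isIn k km)).map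
      (fun km => PySem.Str.find km k)) (fun x => x)).getD 0 + 1

def pvStepB (kl : List String) (d : PySem.Dict String Int) (c : Char) : PySem.Dict String Int :=
  if (d.get? (String.singleton c)).isSome then d
  else d.insert (String.singleton c) (pvF kl (String.singleton c))

theorem pv_foldl_flatMap {α β γ : Type} (f : β → List α) (g : γ → α → γ) (l : List β) (i : γ) :
    (l.flatMap f).foldl g i = l.foldl (fun a x => (f x).foldl g a) i := by
  induction l generalizing i with
  | nil => rfl
  | cons h t ih => simp [List.flatMap_cons, List.foldl_append, ih]

theorem pvA_flat (kl : List String) :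
    get_min_press_dict kl = ((pvEvents kl).foldl pvStepA PySem.Dict.empty).items := by
  unfold get_min_press_dict pvEvents
  rw [pv_foldl_flatMap]
  simp only [List.foldl_map]
  rfl

theorem pvB_flat (kl : List String) :
    get_min_press_dict_alt kl =
      ((PySem.Str.join "" kl).toList.foldl (pvStepB kl) PySem.Dict.empty).items := rfl

-- running minimum over a list, threaded through an Option accumulator
def pvStep (o : Option Int) (v : Int) : Int :=
  match o with | none => v | some m => min m v

def pvOptMin (o : Option Int) (vs : List Int) : Option Int :=
  vs.foldl (fun o v => some (pvStep o v)) o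

theorem pvOptMin_some (m : Int) (vs : List Int) : pvOptMin (some m) vs = some (vs.foldl min m) := by
  induction vs generalizing m with
  | nil => rfl
  | cons v t ih => simpa [pvOptMin, pvStep, List.foldl_cons] using ih (min m v)

theorem pvOptMin_map_add_one (vs : List Int) (o : Option Int) :
    pvOptMin (o.map (· + 1)) (vs.map (· + (1:Int))) = (pvOptMin o vs).map (· + 1) := by
  induction vs generalizing o with
  | nil => rfl
  | cons v t ih =>
    have hstep : pvStep (o.map (· + 1)) (v + 1) = pvStep o v + 1 := by
      cases o with
      | none => rfl
      | some m => simp [pvStep]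
    calc pvOptMin (o.map (· + 1)) ((v :: t).map (· + (1:Int)))
        = pvOptMin (some (pvStep (o.map (· + 1)) (v + 1))) (t.map (· + (1:Int))) := rfl
      _ = pvOptMin ((some (pvStep o v)).map (· + 1)) (t.map (· + (1:Int))) := by rw [hstep]; rfl
      _ = (pvOptMin (some (pvStep o v)) t).map (· + 1) := ih _
      _ = (pvOptMin o (v :: t)).map (· + 1) := rfl

theorem pvA_get? (l : List (String × Int)) (d : PySem.Dict String Int) (k : String) :
    (l.foldl pvStepA d).get? k =
      pvOptMin (d.get? k) ((l.filter (fun p => p.1 == k)).map (·.2)) := by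
  induction l generalizing d with
  | nil => rfl
  | cons p t ih =>
    rw [List.foldl_cons, ih]
    rw [pvStepA_eq, PySem.Dict.get?_insert]
    by_cases h : p.1 = k
    · subst h
      simp only [List.filter_cons, beq_self_eq_true, if_pos, List.map_cons]
      cases d.get? p.1 <;> rfl
    · rw [if_neg (Ne.symm h)]
      simp [h]

theorem pv_keysA (l : List (String × Int)) :
    (l.foldl pvStepA PySem.Dict.empty).keys = PySem.Set.ofList (l.map (·.1)) := by
  rw [pvStepA_funext, PySem.Dict.keys_foldl_insert_key, PySem.Dict.keys_empty,
    PySem.Set.update_nil_left]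

-- singleton strings
theorem pv_singleton_inj {a b : Char} (h : String.singleton a = String.singleton b) : a = b := by
  have h' := congrArg String.toList h
  simpa using h'

theorem pv_singleton_beq (a b : Char) :
    (String.singleton a == String.singleton b) = (a == b) := by
  by_cases h : a = b
  · subst h; simp
  · have hne : String.singleton a ≠ String.singleton b := fun hs => h (pv_singleton_inj hs)
    simp [h, hne]

theorem pv_singleton_prefix (c : Char) (xs : List Char) :
    [c] <+: xs ↔ xs.head? = some c := by
  cases xs with
  | nil => simp
  | cons a t => simp [List.cons_prefix_cons, eq_comm]

-- in-string test for a single character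
theorem pv_isIn_single (c : Char) (l : List Char) :
    PySem.Chars.isIn [c] l = decide (c ∈ l) := by
  by_cases h : c ∈ l
  · simp only [h, decide_true]
    rw [PySem.Chars.isIn_iff_infix]
    obtain ⟨s, t, rfl⟩ := List.append_of_mem h
    exact ⟨s, t, by simp⟩
  · simp only [h, decide_false]
    rw [PySem.Chars.isIn_eq_false_iff]
    intro hinf
    exact h (hinf.subset (List.mem_singleton_self c))

-- find of a single character that occurs is its first index
theorem pv_find_single (c : Char) (cs : List Char) (h : c ∈ cs) :
    PySem.Chars.find cs [c] = (cs.idxOf c : Int) := by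
  have hinf : [c] <:+: cs := by
    obtain ⟨s, t, rfl⟩ := List.append_of_mem h
    exact ⟨s, t, by simp⟩
  have h0 : 0 ≤ PySem.Chars.find cs [c] := (PySem.Chars.find_nonneg_iff _ _).mpr hinf
  obtain ⟨hpre, hmin⟩ := PySem.Chars.find_spec h0
  set f := (PySem.Chars.find cs [c]).toNat with hf
  have hdrop : ∀ i, ([c] <+: cs.drop i) ↔ cs[i]? = some c := by
    intro i
    rw [pv_singleton_prefix, List.head?_drop]
  have hfc : cs[f]? = some c := (hdrop f).mp hpre
  have hidx : cs.idxOf c < cs.length := List.idxOf_lt_length_iff.mpr h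
  have hidxc : cs[cs.idxOf c]? = some c := by
    rw [List.getElem?_eq_getElem hidx]
    exact congrArg some (List.getElem_idxOf hidx)
  have hlow : ∀ i < cs.idxOf c, cs[i]? ≠ some c := by
    intro i hi hic
    have hil : i < cs.length := lt_trans hi hidx
    rw [List.getElem?_eq_getElem hil] at hic
    have hceq : cs[i] = c := Option.some_inj.mp hic
    have hlen : i < (cs.take (cs.idxOf c)).length := by
      rw [List.length_take]; omega
    have hmemtake : c ∈ cs.take (cs.idxOf c) := by
      have hm := List.getElem_mem hlen
      rwa [List.getElem_take, hceq] at hm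
    have := (List.mem_take_iff_idxOf_lt h).mp hmemtake
    omega
  have heq : f = cs.idxOf c := by
    rcases lt_trichotomy f (cs.idxOf c) with hlt | he | hgt
    · exact absurd hfc (hlow f hlt)
    · exact he
    · exfalso
      exact hmin (cs.idxOf c) hgt ((hdrop _).mpr hidxc)
  have : PySem.Chars.find cs [c] = (f : Int) := (Int.toNat_of_nonneg h0).symm
  rw [this, heq]

-- the 1-based positions of c in cs, offset by n
def pvPos (cs : List Char) (c : Char) (n : Int) : List Int :=
  ((PySem.List.enumerate cs n).filter (fun p => p.2 == c)).map (fun p => p.1 + 1)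

theorem pv_min_pos (c : Char) (cs : List Char) : ∀ (n : Int) (o : Option Int),
    pvOptMin o (pvPos cs c n) =
      if c ∈ cs then some (pvStep o (n + (cs.idxOf c : Int) + 1)) else o := by
  induction cs with
  | nil => intro n o; simp [pvPos, PySem.List.enumerate_nil, pvOptMin]
  | cons x t ih =>
    intro n o
    by_cases hx : x = c
    · subst hx
      have hpos : pvPos (x :: t) x n = (n + 1) :: pvPos t x (n + 1) := by
        simp [pvPos, PySem.List.enumerate_cons]
      rw [hpos]
      have h1 : pvOptMin o ((n + 1) :: pvPos t x (n + 1)) =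
          pvOptMin (some (pvStep o (n + 1))) (pvPos t x (n + 1)) := rfl
      rw [h1, ih]
      have hidx0 : (x :: t).idxOf x = 0 := by simp
      simp only [List.mem_cons, true_or, if_true, hidx0, Nat.cast_zero, add_zero]
      by_cases hmem : x ∈ t
      · simp only [hmem, if_true]
        have hge : (0:Int) ≤ (t.idxOf x : Int) := Int.natCast_nonneg _
        cases o with
        | none => simp [pvStep]; omega
        | some m => simp [pvStep]; omega
      · simp [hmem]
    · have hpos : pvPos (x :: t) c n = pvPos t c (n + 1) := by
        simp [pvPos, PySem.List.enumerate_cons, hx]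
      rw [hpos, ih]
      by_cases hmem : c ∈ t
      · have hmem' : c ∈ x :: t := List.mem_cons_of_mem _ hmem
        simp only [hmem, hmem', if_true]
        rw [List.idxOf_cons_ne _ hx]
        push_cast
        ring_nf
      · have hmem' : c ∉ x :: t := by simp [hmem, Ne.symm hx]
        simp [hmem, hmem']

-- A's final value at key (singleton c) for c occurring somewhere
theorem pv_valA (kl : List String) (c : Char) (hc : c ∈ kl.flatMap String.toList) :
    ((pvEvents kl).foldl pvStepA PySem.Dict.empty).getD (String.singleton c) 0
      = pvF kl (String.singleton c) := by
  rw [PySem.Dict.getD_eq_get?_getD, pvA_get?, PySem.Dict.get?_empty]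
  have hfilter : ((pvEvents kl).filter (fun p => p.1 == String.singleton c)).map (·.2)
      = kl.flatMap (fun km => pvPos km.toList c 0) := by
    unfold pvEvents
    rw [List.filter_flatMap, List.map_flatMap]
    congr 1
    funext km
    rw [List.filter_map]
    rw [List.map_map]
    unfold pvPos
    simp only [Function.comp_def, pv_singleton_beq]
  rw [hfilter]
  -- fold the flatMap keymap by keymap
  have hflat : pvOptMin none (kl.flatMap (fun km => pvPos km.toList c 0))
      = kl.foldl (fun o km => pvOptMin o (pvPos km.toList c 0)) none := by
    unfold pvOptMin
    rw [pv_foldl_flatMap]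
  rw [hflat]
  have hcong : kl.foldl (fun o km => pvOptMin o (pvPos km.toList c 0)) none
      = kl.foldl (fun o km => if c ∈ km.toList then
          some (pvStep o ((km.toList.idxOf c : Int) + 1)) else o) none := by
    apply PySem.List.foldl_congr_mem
    intro o km _
    rw [pv_min_pos]
    simp only [zero_add]
  rw [hcong, PySem.List.foldl_ite_eq_foldl_filter]
  have hfold : (kl.filter (fun km => decide (c ∈ km.toList))).foldl
        (fun o km => some (pvStep o ((km.toList.idxOf c : Int) + 1))) none
      = pvOptMin none (((kl.filter (fun km => decide (c ∈ km.toList))).map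
          (fun km => (km.toList.idxOf c : Int))).map (· + 1)) := by
    unfold pvOptMin
    rw [List.foldl_map, List.foldl_map]
  have hmap := pvOptMin_map_add_one ((kl.filter (fun km => decide (c ∈ km.toList))).map
      (fun km => (km.toList.idxOf c : Int))) none
  simp only [Option.map_none] at hmap
  rw [hfold, hmap]
  -- B's side
  unfold pvF
  have hpred : (fun km => PySem.Str.isIn (String.singleton c) km)
      = (fun km => decide (c ∈ km.toList)) := by
    funext km
    rw [PySem.Str.isIn_eq, String.toList_singleton, pv_isIn_single]
  have hfind : (kl.filter (fun km => decide (c ∈ km.toList))).map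
        (fun km => PySem.Str.find km (String.singleton c))
      = (kl.filter (fun km => decide (c ∈ km.toList))).map
        (fun km => (km.toList.idxOf c : Int)) := by
    apply List.map_congr_left
    intro km hkm
    have hmem : c ∈ km.toList := by
      have := List.of_mem_filter hkm
      simpa using this
    rw [PySem.Str.find_eq, String.toList_singleton, pv_find_single c _ hmem]
  rw [hpred, hfind]
  -- the filtered list is nonempty since c occurs in some keymap
  obtain ⟨km0, hkm0, hc0⟩ := List.mem_flatMap.mp hc
  have hne : (kl.filter (fun km => decide (c ∈ km.toList))).map
      (fun km => (km.toList.idxOf c : Int)) ≠ [] := by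
    simp only [ne_eq, List.map_eq_nil_iff, List.filter_eq_nil_iff, not_forall]
    exact ⟨km0, hkm0, by simpa using hc0⟩
  cases hl : (kl.filter (fun km => decide (c ∈ km.toList))).map
      (fun km => (km.toList.idxOf c : Int)) with
  | nil => exact absurd hl hne
  | cons x t =>
    rw [PySem.List.min?_id_cons]
    have : pvOptMin none (x :: t) = pvOptMin (some x) t := rfl
    rw [this, pvOptMin_some]
    simp

-- keys of B's fold
theorem pvB_keys (kl : List String) (cs : List Char) (d : PySem.Dict String Int) :
    (cs.foldl (pvStepB kl) d).keys = PySem.Set.update d.keys (cs.map String.singleton) := by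
  induction cs generalizing d with
  | nil => rfl
  | cons x t ih =>
    rw [List.foldl_cons, ih]
    have hupd : PySem.Set.update d.keys ((x :: t).map String.singleton)
        = PySem.Set.update (PySem.Set.add d.keys (String.singleton x)) (t.map String.singleton) := rfl
    rw [hupd]
    congr 1
    unfold pvStepB
    by_cases h : (d.get? (String.singleton x)).isSome
    · rw [if_pos h]
      have hmem : String.singleton x ∈ d.keys := by
        by_contra hnm
        rw [(PySem.Dict.get?_eq_none_iff_not_mem_keys d _).mpr hnm] at h
        simp at h
      simp [PySem.Set.add, PySem.Set.contains, hmem]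
    · rw [if_neg h]
      have hct : d.contains (String.singleton x) = false := by
        rw [PySem.Dict.contains_eq_isSome_get?]
        simpa using h
      rw [PySem.Dict.keys_insert_of_not_contains _ _ hct]
      have hnm : String.singleton x ∉ d.keys := by
        rw [← PySem.Dict.get?_eq_none_iff_not_mem_keys]
        simpa using h
      simp [PySem.Set.add, PySem.Set.contains, hnm]

theorem pvB_get? (kl : List String) (cs : List Char) (d : PySem.Dict String Int) (k : String) :
    (cs.foldl (pvStepB kl) d).get? k =
      match d.get? k with
      | some v => some v
      | none => if k ∈ cs.map String.singleton then some (pvF kl k) else none := by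
  induction cs generalizing d with
  | nil => cases hdk : d.get? k <;> simp [hdk]
  | cons x t ih =>
    rw [List.foldl_cons]
    by_cases h : (d.get? (String.singleton x)).isSome
    · rw [show pvStepB kl d x = d from by simp [pvStepB, h]]
      rw [ih]
      by_cases hk : k = String.singleton x
      · obtain ⟨v, hv⟩ := Option.isSome_iff_exists.mp h
        rw [hk, hv]
      · cases hdk : d.get? k with
        | some v => simp
        | none => simp [hk]
    · rw [show pvStepB kl d x = d.insert (String.singleton x) (pvF kl (String.singleton x)) from by
        simp [pvStepB, h]]
      rw [ih]
      by_cases hk : k = String.singleton x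
      · have hdk : d.get? (String.singleton x) = none := by
          cases hdx : d.get? (String.singleton x) with
          | some v => rw [hdx] at h; simp at h
          | none => rfl
        rw [hk]
        simp [PySem.Dict.get?_insert_self, hdk]
      · rw [PySem.Dict.get?_insert, if_neg hk]
        cases hdk : d.get? k with
        | some v => simp
        | none => simp [hk]

theorem pv_events_fst (kl : List String) :
    (pvEvents kl).map (·.1) = (kl.flatMap String.toList).map String.singleton := by
  unfold pvEvents
  rw [List.map_flatMap, List.map_flatMap]
  congr 1
  funext s
  have h2 := congrArg (List.map String.singleton) (PySem.List.map_snd_enumerate s.toList 0)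
  simp only [List.map_map, Function.comp_def] at h2 ⊢
  exact h2

theorem pv_join_empty (kl : List String) :
    (PySem.Str.join "" kl).toList = kl.flatMap String.toList := by
  rw [PySem.Str.toList_join]
  have hnil : ("" : String).toList = [] := rfl
  rw [hnil]
  induction kl with
  | nil => simp [PySem.Chars.join_nil]
  | cons a t ih =>
    cases t with
    | nil => simp [PySem.Chars.join_singleton]
    | cons b r =>
      simp only [List.map_cons] at ih ⊢
      rw [PySem.Chars.join_cons_cons, List.flatMap_cons, ← ih]
      simp

-- ===== VERDICT (by name: the statement is the Claim_ definition above) =====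
theorem get_min_press_dict_spec : Claim_equal_get_min_press_dict := by
  intro kl _
  unfold Spec_get_min_press_dict
  rw [pvA_flat, pvB_flat]
  have ndA : ((pvEvents kl).foldl pvStepA PySem.Dict.empty).keys.Nodup := by
    rw [pvStepA_funext]
    exact PySem.Dict.nodup_keys_foldl_insert_key _ _ _ _ (by simp [PySem.Dict.keys_empty])
  have hkB : ((PySem.Str.join "" kl).toList.foldl (pvStepB kl) PySem.Dict.empty).keys
      = PySem.Set.ofList (((kl.flatMap String.toList)).map String.singleton) := by
    rw [pvB_keys, PySem.Dict.keys_empty, PySem.Set.update_nil_left, pv_join_empty]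
  have ndB : ((PySem.Str.join "" kl).toList.foldl (pvStepB kl) PySem.Dict.empty).keys.Nodup := by
    rw [hkB]; exact PySem.Set.nodup_ofList _
  rw [PySem.Dict.items_eq_map_keys _ ndA 0, PySem.Dict.items_eq_map_keys _ ndB 0]
  rw [pv_keysA, pv_events_fst, hkB]
  apply List.map_congr_left
  intro k hk
  have hk' : k ∈ (kl.flatMap String.toList).map String.singleton :=
    (PySem.Set.mem_ofList _ _).mp hk
  obtain ⟨c, hc, rfl⟩ := List.mem_map.mp hk'
  congr 1
  rw [pv_valA kl c hc]
  rw [PySem.Dict.getD_eq_get?_getD, pvB_get? kl _ _ _, PySem.Dict.get?_empty]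
  rw [pv_join_empty]
  simp only [List.mem_map]
  rw [if_pos ⟨c, hc, rfl⟩]
  rfl
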